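-- pv_equiv track=rewrite | github.com/zuanbishuihun/cs61a2022-fall | lab03/lab03.py | get_k_run_starter
-- ===== SOURCE A (Python) =====
-- def get_k_run_starter(n, k):
--     """Returns the 0th digit of the kth increasing run within n.
--     >>> get_k_run_starter(123444345, 0) # example from description
--     3
--     >>> get_k_run_starter(123444345, 1)
--     4
--     >>> get_k_run_starter(123444345, 2)
--     4
--     >>> get_k_run_starter(123444345, 3)
--     1
--     >>> get_k_run_starter(123412341234, 1)
--     1
--     >>> get_k_run_starter(1234234534564567, 0)
--     4
--     >>> get_k_run_starter(1234234534564567, 1)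
--     3
--     >>> get_k_run_starter(1234234534564567, 2)
--     2
--     """
--     # 观看lab3 walkthrough才做出
--     i = 0
--     final = None
--     while i <= k:
--         while n > 10 and (n % 10 - (n // 10) % 10) > 0:
--             n = n // 10
--         final = n % 10
--         i = i+1
--         n = n // 10
--     return final
-- ===== SOURCE B (Python) =====
-- def get_k_run_starter(n, k):
--     """Left-to-right: render n as its decimal string, split it into maximal
--     strictly-increasing runs in one zip pass collecting each run's first digit,
--     then pick the k-th starter counted from the right (0 past the last run)."""
--     s = str(n)
--     starts = [s[0]]
--     for prev, cur in zip(s, s[1:]):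
--         if cur <= prev:          # cur begins a new run
--             starts.append(cur)
--     if k < len(starts):
--         return int(starts[len(starts) - 1 - k])
--     return 0
-- ===== Notes on version B (the rewrite author's own statement) =====
-- stated objective: faster
-- what changed: A peels runs off the low end of n arithmetically, one outer iteration per k even after the digits are exhausted; B renders n as its decimal string, scans it once left-to-right with zip splitting it into strictly-increasing runs, collects each run's first digit and indexes the starters from the right.
-- outside the precondition, e.g. on get_k_run_starter(-7, 0): A returns 3, B raises ValueError; on get_k_run_starter(5, -1): A returns None, B raises IndexError
import Mathlib
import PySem

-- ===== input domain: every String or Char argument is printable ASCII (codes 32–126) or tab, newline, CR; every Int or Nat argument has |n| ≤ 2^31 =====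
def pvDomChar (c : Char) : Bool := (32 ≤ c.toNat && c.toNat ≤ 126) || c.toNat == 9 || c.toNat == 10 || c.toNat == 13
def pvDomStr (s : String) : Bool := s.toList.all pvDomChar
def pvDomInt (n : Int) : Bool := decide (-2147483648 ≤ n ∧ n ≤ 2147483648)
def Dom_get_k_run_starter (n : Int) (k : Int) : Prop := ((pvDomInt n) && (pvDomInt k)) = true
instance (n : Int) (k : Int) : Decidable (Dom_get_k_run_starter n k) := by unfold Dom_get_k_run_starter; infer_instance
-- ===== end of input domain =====

-- B replaces A's arithmetic low-end run peeling (one outer iteration per k) by rendering n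
-- as its decimal string, one left-to-right zip pass splitting it into strictly-increasing
-- runs and collecting the starters, then indexing them from the right (objective: faster, measured).

-- ===== PORT A =====
-- inner while loop: while n > 10 and (n % 10 - (n // 10) % 10) > 0: n = n // 10
def pvInnerA (n : Int) : Int :=
  if h : n > 10 ∧ (PySem.Int.mod n 10 - PySem.Int.mod (PySem.Int.floordiv n 10) 10) > 0 then
    pvInnerA (PySem.Int.floordiv n 10)
  else n
termination_by n.toNat
decreasing_by
  have h10 : (10 : Int) < n := h.1
  have : PySem.Int.floordiv n 10 = n / 10 := PySem.Int.floordiv_eq_ediv_of_pos (by omega)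
  rw [this]; omega

-- outer while loop: while i <= k: …; final = n % 10; i = i + 1; n = n // 10
def pvOuterA (n : Int) (k : Int) (i : Int) (final : Option Int) : Option Int :=
  if h : i ≤ k then
    let n1 := pvInnerA n
    pvOuterA (PySem.Int.floordiv n1 10) k (i + 1) (some (PySem.Int.mod n1 10))
  else final
termination_by (k + 1 - i).toNat
decreasing_by omega

def get_k_run_starter (n : Int) (k : Int) : Int :=
  -- Python returns `final`, which is None only when k < 0 (excluded by Pre_): .getD 0
  (pvOuterA n k 0 none).getD 0

-- ===== PORT B =====
-- s = str(n); starts = [s[0]]; for prev, cur in zip(s, s[1:]): if cur <= prev: starts.append(cur)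
-- return int(starts[len(starts)-1-k]) if k < len(starts) else 0.
-- int(single char) is PySem.Int.ofChars? [·]; its .getD 0 covers only the none case,
-- which under Pre_ never occurs (the chars are decimal digits).
def get_k_run_starter_alt (n : Int) (k : Int) : Int :=
  let s := PySem.Int.toChars n
  let starts := (List.zip s (PySem.List.slice s (some 1) none)).foldl
    (fun acc pc => if pc.2 ≤ pc.1 then acc ++ [pc.2] else acc)
    [PySem.List.pyGetD s 0 ' ']
  if k < PySem.List.len starts then
    (PySem.Int.ofChars? [PySem.List.pyGetD starts (PySem.List.len starts - 1 - k) ' ']).getD 0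
  else 0

-- ===== PRECONDITION & SPEC =====
-- Pre_ keeps the natural domain: k < 0 makes A return None (not an Int) and B raise
-- IndexError; on n < 0 A's floor-division digit arithmetic yields artefact digits of the
-- infinite 9-padded expansion while B raises ValueError on int('-').
def Pre_get_k_run_starter (n : Int) (k : Int) : Prop := 0 ≤ n ∧ 0 ≤ k
instance (n : Int) (k : Int) : Decidable (Pre_get_k_run_starter n k) := by
  unfold Pre_get_k_run_starter; infer_instance

def pvWitness_get_k_run_starter : Int × Int := (123444345, 2)

def Spec_get_k_run_starter (n : Int) (k : Int) (out : Int) : Prop := out = get_k_run_starter_alt n k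
instance (n : Int) (k : Int) (out : Int) : Decidable (Spec_get_k_run_starter n k out) := by unfold Spec_get_k_run_starter; infer_instance

-- ===== CLAIM (what is proved, stated in full; the proofs are below) =====
def Claim_equal_get_k_run_starter : Prop := ∀ (n : Int) (k : Int), Dom_get_k_run_starter n k → Pre_get_k_run_starter n k → Spec_get_k_run_starter n k (get_k_run_starter n k)

-- ===== LEMMAS AND PROOFS =====

-- pvRun m j : A's `final` after j+1 outer iterations starting from n = m.
def pvRun (m : Int) (j : Nat) : Int :=
  match j with
  | 0 => PySem.Int.mod (pvInnerA m) 10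
  | j+1 => pvRun (PySem.Int.floordiv (pvInnerA m) 10) j

-- the run starters of m, least-significant first (proof-side characterisation of A)
def pvStartsB (m : Int) : List Int :=
  let d := PySem.Int.mod m 10
  let m' := PySem.Int.floordiv m 10
  if h : m' ≤ 0 then [d]
  else if d ≤ PySem.Int.mod m' 10 then d :: pvStartsB m' else pvStartsB m'
termination_by m.toNat
decreasing_by
  all_goals
    have h1 : (0 : Int) < PySem.Int.floordiv m 10 := by omega
    have h2 : PySem.Int.floordiv m 10 = m / 10 := by
      by_cases hm : 0 < (10:Int)
      · exact PySem.Int.floordiv_eq_ediv_of_pos hm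
      · omega
    rw [h2] at h1 ⊢; omega

theorem pvOuterA_eq_run : ∀ (j : Nat) (m k i : Int) (final : Option Int),
    i ≤ k → (k - i).toNat = j → pvOuterA m k i final = some (pvRun m j) := by
  intro j
  induction j with
  | zero =>
    intro m k i final hik hj
    rw [pvOuterA]
    simp only [dif_pos hik]
    rw [pvOuterA]
    have : ¬ (i + 1 ≤ k) := by omega
    simp only [dif_neg this]
    rfl
  | succ j ih =>
    intro m k i final hik hj
    rw [pvOuterA]
    simp only [dif_pos hik]
    rw [ih _ k (i+1) _ (by omega) (by omega)]
    rfl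

theorem pvRun_congr (a b : Int) (h : pvInnerA a = pvInnerA b) (j : Nat) :
    pvRun a j = pvRun b j := by
  cases j <;> simp [pvRun, h]

theorem pvInnerA0 : pvInnerA 0 = 0 := by
  rw [pvInnerA]
  simp

theorem pvRun_zero' (j : Nat) : pvRun 0 j = 0 := by
  induction j with
  | zero =>
    show PySem.Int.mod (pvInnerA 0) 10 = 0
    rw [pvInnerA0]; decide
  | succ j ih =>
    show pvRun (PySem.Int.floordiv (pvInnerA 0) 10) j = 0
    rw [pvInnerA0]
    have h2 : PySem.Int.floordiv (0:Int) 10 = 0 := by decide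
    rw [h2, ih]

theorem pvRun_eq_starts (m : Int) (hm : 0 ≤ m) (j : Nat) :
    pvRun m j = (pvStartsB m).getD j 0 := by
  induction hn : m.toNat using Nat.strong_induction_on generalizing m j with
  | _ N ih =>
  subst hn
  have hfd : PySem.Int.floordiv m 10 = m / 10 := PySem.Int.floordiv_eq_ediv_of_pos (by omega)
  have hmd : PySem.Int.mod m 10 = m % 10 := PySem.Int.mod_eq_emod_of_pos (by omega)
  by_cases hstop : m > 10 ∧ (PySem.Int.mod m 10 - PySem.Int.mod (PySem.Int.floordiv m 10) 10) > 0
  · -- inner loop takes a step: both pvRun and pvStartsB pass to m / 10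
    have hinner : pvInnerA m = pvInnerA (PySem.Int.floordiv m 10) := by
      rw [pvInnerA]; simp only [dif_pos hstop]
    have hm' : (0:Int) < m / 10 := by
      have := hstop.1; omega
    have hstarts : pvStartsB m = pvStartsB (PySem.Int.floordiv m 10) := by
      rw [pvStartsB]
      have hne : ¬ (PySem.Int.floordiv m 10 ≤ 0) := by rw [hfd]; omega
      simp only [dif_neg hne]
      have hmd' : PySem.Int.mod (PySem.Int.floordiv m 10) 10 =
          (m / 10) % 10 := by rw [hfd]; exact PySem.Int.mod_eq_emod_of_pos (by omega)
      have hgt : ¬ (PySem.Int.mod m 10 ≤ PySem.Int.mod (PySem.Int.floordiv m 10) 10) := by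
        have := hstop.2; omega
      simp only [if_neg hgt]
    rw [pvRun_congr m (PySem.Int.floordiv m 10) hinner, hstarts]
    have hlt : (PySem.Int.floordiv m 10).toNat < m.toNat := by
      rw [hfd]; have := hstop.1; omega
    exact ih _ hlt _ (by rw [hfd]; omega) _ rfl
  · -- inner loop stops here
    have hinner : pvInnerA m = m := by rw [pvInnerA]; simp only [dif_neg hstop]
    by_cases hsmall : m / 10 ≤ 0
    · have hstarts : pvStartsB m = [PySem.Int.mod m 10] := by
        rw [pvStartsB]
        simp only [hfd, dif_pos hsmall]
      rw [hstarts]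
      cases j with
      | zero => simp [pvRun, hinner]
      | succ j =>
        show pvRun (PySem.Int.floordiv (pvInnerA m) 10) j = _
        rw [hinner, hfd]
        have : m / 10 = 0 := by omega
        rw [this, pvRun_zero']
        simp
    · -- at least two digits and the run stops: head digit is a starter
      have hm10 : (10:Int) ≤ m := by omega
      have hmd' : PySem.Int.mod (PySem.Int.floordiv m 10) 10 = (m / 10) % 10 := by
        rw [hfd]; exact PySem.Int.mod_eq_emod_of_pos (by omega)
      have hle : PySem.Int.mod m 10 ≤ PySem.Int.mod (PySem.Int.floordiv m 10) 10 := by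
        rcases eq_or_lt_of_le hm10 with h10 | h10
        · rw [hmd, hmd', ← h10]; decide
        · have := not_and.mp hstop h10; omega
      have hstarts : pvStartsB m =
          PySem.Int.mod m 10 :: pvStartsB (PySem.Int.floordiv m 10) := by
        rw [pvStartsB]
        simp only [dif_neg (by rw [hfd]; omega : ¬ (PySem.Int.floordiv m 10 ≤ 0)), if_pos hle]
      rw [hstarts]
      cases j with
      | zero => simp [pvRun, hinner]
      | succ j =>
        show pvRun (PySem.Int.floordiv (pvInnerA m) 10) j = _
        rw [hinner]
        have hlt : (PySem.Int.floordiv m 10).toNat < m.toNat := by rw [hfd]; omega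
        rw [ih _ hlt _ (by rw [hfd]; omega) _ rfl]
        simp

-- ---- the decimal char string of a Nat, most-significant first ----
def pvDigs (n : Nat) : List Char :=
  if h : n < 10 then [Nat.digitChar (n % 10)]
  else pvDigs (n / 10) ++ [Nat.digitChar (n % 10)]
termination_by n
decreasing_by exact Nat.div_lt_self (by omega) (by omega)

theorem pvDigs_ne_nil (n : Nat) : pvDigs n ≠ [] := by
  rw [pvDigs]; split <;> simp

theorem pvDigs_getLastD (n : Nat) (d : Char) :
    (pvDigs n).getLastD d = Nat.digitChar (n % 10) := by
  rw [pvDigs]; split <;> simp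

theorem pvToDigitsCore_eq : ∀ (f n : Nat) (acc : List Char), n < f →
    Nat.toDigitsCore 10 f n acc = pvDigs n ++ acc := by
  intro f
  induction f with
  | zero => omega
  | succ f ih =>
    intro n acc hn
    rw [Nat.toDigitsCore]
    by_cases h0 : n / 10 = 0
    · have h10 : n < 10 := by omega
      simp only [h0, if_pos]
      rw [pvDigs]
      simp [h10]
    · have h10 : ¬ n < 10 := by omega
      simp only [h0, if_neg h0]
      rw [ih (n / 10) _ (by omega)]
      have hEq : pvDigs n = pvDigs (n / 10) ++ [Nat.digitChar (n % 10)] := by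
        rw [pvDigs]; simp [h10]
      rw [hEq]
      simp

theorem pvToChars_eq (n : Int) (hn : 0 ≤ n) :
    PySem.Int.toChars n = pvDigs n.toNat := by
  have : ¬ n < 0 := by omega
  simp only [PySem.Int.toChars, if_neg this, Nat.toDigits]
  rw [pvToDigitsCore_eq _ _ _ (by omega)]
  simp

-- ---- B's left-to-right scan, structurally ----
def pvGo (prev : Char) : List Char → List Char
  | [] => []
  | c :: cs => (if c ≤ prev then [c] else []) ++ pvGo c cs

def pvChStarts : List Char → List Char
  | [] => []
  | c :: cs => c :: pvGo c cs

theorem pvFoldZip : ∀ (cs : List Char) (c : Char) (acc : List Char),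
    (List.zip (c :: cs) cs).foldl
      (fun acc pc => if pc.2 ≤ pc.1 then acc ++ [pc.2] else acc) acc
    = acc ++ pvGo c cs := by
  intro cs
  induction cs with
  | nil => intro c acc; simp [pvGo]
  | cons c' cs' ih =>
    intro c acc
    simp only [List.zip_cons_cons, List.foldl_cons, pvGo]
    rw [ih]
    split_ifs <;> simp

-- the port's starts-building fold equals pvChStarts on a nonempty string
theorem pvStartsFold_eq (s : List Char) (hs : s ≠ []) :
    (List.zip s (PySem.List.slice s (some 1) none)).foldl
      (fun acc pc => if pc.2 ≤ pc.1 then acc ++ [pc.2] else acc)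
      [PySem.List.pyGetD s 0 ' ']
    = pvChStarts s := by
  cases s with
  | nil => exact absurd rfl hs
  | cons c cs =>
    rw [PySem.List.slice_from_one]
    simp only [List.tail_cons, PySem.List.pyGetD_zero_cons]
    rw [pvFoldZip]
    simp [pvChStarts]

theorem pvGo_append (cs : List Char) (prev c : Char) :
    pvGo prev (cs ++ [c]) = pvGo prev cs ++ (if c ≤ cs.getLastD prev then [c] else []) := by
  induction cs generalizing prev with
  | nil => simp [pvGo]
  | cons c' cs' ih =>
    simp only [List.cons_append, pvGo, List.getLastD_cons, ih c', List.append_assoc]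

theorem pvChStarts_append (t : List Char) (ht : t ≠ []) (c : Char) :
    pvChStarts (t ++ [c]) = pvChStarts t ++ (if c ≤ t.getLastD ' ' then [c] else []) := by
  cases t with
  | nil => exact absurd rfl ht
  | cons c0 cs =>
    simp only [List.cons_append, pvChStarts, pvGo_append, List.getLastD_cons]

theorem pvDigitChar_le_iff : ∀ a, a < 10 → ∀ b, b < 10 →
    (Nat.digitChar a ≤ Nat.digitChar b ↔ a ≤ b) := by decide

theorem pvOfChars_digitChar : ∀ d, d < 10 → PySem.Int.ofChars? [Nat.digitChar d] = some (d : Int) := by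
  decide

-- bridge: B's scan of the digit string = the reversal of pvStartsB, digit by digit
theorem pvChStarts_digs : ∀ n : Nat,
    pvChStarts (pvDigs n) =
      ((pvStartsB (n : Int)).reverse).map (fun d => Nat.digitChar d.toNat) := by
  intro n
  induction n using Nat.strong_induction_on with
  | _ n ih =>
  have hfd : PySem.Int.floordiv (n : Int) 10 = ((n / 10 : Nat) : Int) := by
    exact_mod_cast PySem.Int.floordiv_natCast n 10
  have hmd : PySem.Int.mod (n : Int) 10 = ((n % 10 : Nat) : Int) := by
    exact_mod_cast PySem.Int.mod_natCast n 10
  by_cases h10 : n < 10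
  · rw [pvDigs]
    simp only [dif_pos h10]
    rw [pvStartsB]
    have : PySem.Int.floordiv (n : Int) 10 ≤ 0 := by
      rw [hfd]; exact_mod_cast Nat.le_of_lt_succ (by omega)
    simp only [dif_pos this, hmd]
    simp only [pvChStarts, pvGo, List.reverse_cons, List.reverse_nil, List.nil_append,
      List.map_cons, List.map_nil]
    have h' : (((n % 10 : Nat) : Int)).toNat = n % 10 := by omega
    rw [h']
  · rw [pvDigs]
    simp only [dif_neg h10]
    rw [pvChStarts_append _ (pvDigs_ne_nil _), pvDigs_getLastD, ih (n / 10) (by omega)]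
    conv_rhs => rw [pvStartsB]
    have hne : ¬ (PySem.Int.floordiv (n : Int) 10 ≤ 0) := by
      rw [hfd]
      have : 1 ≤ n / 10 := by omega
      exact_mod_cast not_le.mpr (by exact_mod_cast this : (0:Int) < ((n/10 : Nat) : Int))
    have hne' : ¬ (((n / 10 : Nat) : Int) ≤ 0) := by
      have h1 : 0 < n / 10 := by omega
      exact_mod_cast not_le.mpr (by exact_mod_cast h1 : (0:Int) < ((n / 10 : Nat) : Int))
    have hmd2 : PySem.Int.mod (((n / 10 : Nat) : Int)) 10 = ((n / 10 % 10 : Nat) : Int) := by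
      exact_mod_cast PySem.Int.mod_natCast (n / 10) 10
    simp only [hmd, hfd, hmd2, dif_neg hne']
    by_cases hle : n % 10 ≤ n / 10 % 10
    · rw [if_pos ((pvDigitChar_le_iff _ (Nat.mod_lt _ (by omega)) _ (Nat.mod_lt _ (by omega))).mpr hle),
          if_pos (by exact_mod_cast hle : ((n % 10 : Nat) : Int) ≤ ((n / 10 % 10 : Nat) : Int))]
      have hx : ((n : Int) % 10).toNat = n % 10 := by omega
      simp [hx]
    · rw [if_neg (fun hc => hle ((pvDigitChar_le_iff _ (Nat.mod_lt _ (by omega)) _ (Nat.mod_lt _ (by omega))).mp hc)),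
          if_neg (by exact_mod_cast hle : ¬ ((n % 10 : Nat) : Int) ≤ ((n / 10 % 10 : Nat) : Int))]
      simp

theorem pvStartsB_bounds (m : Int) (hm : 0 ≤ m) :
    ∀ d ∈ pvStartsB m, 0 ≤ d ∧ d < 10 := by
  induction hn : m.toNat using Nat.strong_induction_on generalizing m with
  | _ N ih =>
  subst hn
  have hfd : PySem.Int.floordiv m 10 = m / 10 := PySem.Int.floordiv_eq_ediv_of_pos (by omega)
  have hd0 : 0 ≤ PySem.Int.mod m 10 := PySem.Int.mod_nonneg m (by omega)
  have hd1 : PySem.Int.mod m 10 < 10 := PySem.Int.mod_lt m (by omega)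
  rw [pvStartsB]
  by_cases hsm : PySem.Int.floordiv m 10 ≤ 0
  · simp only [dif_pos hsm]
    intro d hd
    simp at hd
    omega
  · simp only [dif_neg hsm]
    have hlt : (PySem.Int.floordiv m 10).toNat < m.toNat := by rw [hfd] at hsm ⊢; omega
    have hrec := ih _ hlt (PySem.Int.floordiv m 10) (by omega) rfl
    split_ifs
    · intro d hd
      rcases List.mem_cons.mp hd with h | h
      · omega
      · exact hrec d h
    · exact hrec

-- ===== VERDICT (by name: the statement is the Claim_ definition above) =====
theorem get_k_run_starter_spec : Claim_equal_get_k_run_starter := by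
  intro n k _hDom hPre
  obtain ⟨hn, hk⟩ := hPre
  unfold Spec_get_k_run_starter
  unfold get_k_run_starter
  rw [pvOuterA_eq_run k.toNat n k 0 none (by omega) (by omega)]
  rw [Option.getD_some, pvRun_eq_starts n hn k.toNat]
  simp only [get_k_run_starter_alt]
  rw [pvToChars_eq n hn, pvStartsFold_eq _ (pvDigs_ne_nil _), pvChStarts_digs,
    Int.toNat_of_nonneg hn]
  set R := pvStartsB n with hR
  have hlenS : ((R.reverse).map (fun d => Nat.digitChar d.toNat)).length = R.length := by
    simp
  by_cases hkl : k < (R.length : Int)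
  · rw [if_pos (by rw [PySem.List.len_eq, hlenS]; exact_mod_cast hkl)]
    have hkN : k.toNat < R.length := by omega
    have hidx : PySem.List.len ((R.reverse).map (fun d => Nat.digitChar d.toNat)) - 1 - k =
        ((R.length : Int) - 1 - k) := by rw [PySem.List.len_eq, hlenS]
    rw [hidx]
    rw [PySem.List.pyGetD_eq_getElem ((R.reverse).map (fun d => Nat.digitChar d.toNat)) ' '
      (by omega) (by rw [hlenS]; omega)]
    have hget : ((R.reverse).map (fun d => Nat.digitChar d.toNat))[((R.length : Int) - 1 - k).toNat]'(by rw [hlenS]; omega)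
        = Nat.digitChar (R[k.toNat]'hkN).toNat := by
      have hidx2 : R.length - 1 - ((R.length : Int) - 1 - k).toNat = k.toNat := by omega
      rw [List.getElem_map, List.getElem_reverse]
      simp only [hidx2]
    rw [hget]
    have hb := pvStartsB_bounds n hn (R[k.toNat]'hkN) (List.getElem_mem hkN)
    rw [pvOfChars_digitChar _ (by omega)]
    rw [Option.getD_some, Int.toNat_of_nonneg hb.1]
    exact List.getD_eq_getElem R 0 hkN
  · rw [if_neg (by rw [PySem.List.len_eq, hlenS]; exact_mod_cast hkl)]
    rw [List.getD_eq_default]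
    omega
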